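-- pv_equiv track=rewrite | github.com/kuppan4109/Search_Insights_API_Code | Scripts/functions.py | create_title
-- ===== SOURCE A (Python) =====
-- def create_title(aggregations, group_by, col_list_title, keys, growth_nlu):
--     """
--     generate default title for chart using keywords generated from the input text
--     """
--
--     title1, title2 = [], []
--     # NLU -> Natural language understanding eg: average of month or by category
--     title_nlus = aggregations + group_by
--
--     # loop the column
--     for column_1 in col_list_title:
--         for column_2 in title_nlus:
--             col_words = column_2.split()
--
--             if str(col_words[0]) == 'by':
--                 # join the splitted words except by (for categorical column)
--                 attribute1 = ' '.join(col_words[1:])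
--                 if column_1 == attribute1:
--                     title_nlus.remove(column_2)
--                     title2.append(attribute1)
--                     break
--             else:
--                 # join the splitted words except first 2 words (numerical column)
--                 attribute1 = ' '.join(col_words[2:])
--                 if column_1 == attribute1:
--                     attribute2 = ' '.join(column_2.split(' of '))
--                     attribute2 = attribute2.replace("sum ", 'total ')
--                     title1.append(attribute2)
--                     title_nlus.remove(column_2)
--                     break
--     # join the first title list (numerical aggregations eg: total sales and average profit)
--     title1 = ' and '.join(title1)
--     if len(title2) > 0:
--         # Append the title 2 with title 1 (title 2 will contains categorical column names)
--         title2 = ' and '.join(title2)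
--         title = title1 + ' by ' + title2
--         title = title.replace('_', ' ')
--     else:
--         title = title1.replace('_', ' ')
--
--     # keys list will contains time phrases like days months
--     if len(keys) > 0:
--         title_list = title.split()
--         # If "by" already present in title we need not add one more "by" otherewise we have to
--         if 'by' in title_list:
--             if len(keys) == 1:
--                 title = title + ' ' + 'and ' + keys[0]
--             else:
--                 title = title + ' ' + ' and '.join(keys)
--         else:
--             if len(keys) == 1:
--                 title = title + ' ' + ' by ' + keys[0]
--             else:
--                 title = title + ' by ' + ' and '.join(keys)
--     # growth nlu list contains terms like MTD YTD if anything present in the list we need to append them in beginning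
--     if len(growth_nlu) > 0:
--         title = 'and '.join(growth_nlu) + ' ' + title
--
--     return title
-- ===== SOURCE B (Python) =====
-- def _append_keys(title, keys):
--     # time phrases: 'by' already in the title switches the connector
--     if 'by' in title.split():
--         if len(keys) == 1:
--             return title + ' and ' + keys[0]
--         return title + ' ' + ' and '.join(keys)
--     if len(keys) == 1:
--         return title + '  by ' + keys[0]
--     return title + ' by ' + ' and '.join(keys)
--
--
-- def create_title(aggregations, group_by, col_list_title, keys, growth_nlu):
--     # Index the NLU phrases by their attribute once, then pop the first
--     # remaining match per column: O(N + M) instead of A's rescans.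
--     index = {}
--     for phrase in aggregations + group_by:
--         words = phrase.split()
--         if words[0] == 'by':
--             attr = ' '.join(words[1:])
--             entry = (True, attr)
--         else:
--             attr = ' '.join(words[2:])
--             entry = (False, ' '.join(phrase.split(' of ')).replace('sum ', 'total '))
--         index.setdefault(attr, []).append(entry)
--
--     title1, title2 = [], []
--     for col in col_list_title:
--         queue = index.get(col)
--         if queue:
--             is_by, text = queue.pop(0)
--             (title2 if is_by else title1).append(text)
--
--     title = ' and '.join(title1)
--     if title2:
--         title = title + ' by ' + ' and '.join(title2)
--     title = title.replace('_', ' ')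
--
--     if len(keys) > 0:
--         title = _append_keys(title, keys)
--     if len(growth_nlu) > 0:
--         title = 'and '.join(growth_nlu) + ' ' + title
--     return title
-- ===== Notes on version B (the rewrite author's own statement) =====
-- stated objective: faster
-- what changed: B builds a dict mapping each NLU phrase's stripped attribute to a queue of ready-made (is_by, text) entries once, then pops the first remaining entry per column, replacing A's rescan of the shrinking phrase list (with its per-phrase split/join and list.remove) for every column.
-- outside the precondition, e.g. on create_title([' '], [], [], [], []): A returns '', B raises IndexError
import Mathlib
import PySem

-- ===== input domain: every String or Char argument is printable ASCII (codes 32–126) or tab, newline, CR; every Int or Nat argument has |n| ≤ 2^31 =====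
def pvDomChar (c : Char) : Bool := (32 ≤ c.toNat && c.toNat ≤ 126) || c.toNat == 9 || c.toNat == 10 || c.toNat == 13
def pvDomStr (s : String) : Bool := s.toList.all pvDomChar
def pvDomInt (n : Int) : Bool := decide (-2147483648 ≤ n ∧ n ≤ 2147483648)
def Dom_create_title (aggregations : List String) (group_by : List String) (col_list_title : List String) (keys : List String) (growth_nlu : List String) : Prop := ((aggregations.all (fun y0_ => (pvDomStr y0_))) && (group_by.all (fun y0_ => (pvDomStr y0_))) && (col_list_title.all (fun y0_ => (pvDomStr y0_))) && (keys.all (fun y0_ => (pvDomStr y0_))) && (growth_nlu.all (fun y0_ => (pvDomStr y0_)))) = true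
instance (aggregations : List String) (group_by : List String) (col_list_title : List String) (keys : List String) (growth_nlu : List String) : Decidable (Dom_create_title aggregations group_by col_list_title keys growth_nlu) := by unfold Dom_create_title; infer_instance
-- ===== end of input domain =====

-- B indexes the NLU phrases by attribute in a dict of queues and pops the first match per
-- column (one pass) instead of A's rescans of a shrinking list; return value only, no shared
-- mutation is observable.


-- ===== PORT A =====
-- inner `for column_2 in title_nlus` loop: returns (is_by_branch, matched phrase, text appended)
-- for the first phrase whose attribute equals the column, none if the loop falls through.
-- `col_words[0]` (IndexError on a whitespace-only phrase, excluded by Pre_) is read as head?.getD "".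
def ctA_scan (col : String) : List String → Option (Bool × String × String)
  | [] => none
  | p :: rest =>
    let ws := PySem.Str.split₀ p
    if ws.head?.getD "" = "by" then
      let attribute1 := PySem.Str.join " " (ws.drop 1)
      if col = attribute1 then some (true, p, attribute1) else ctA_scan col rest
    else
      let attribute1 := PySem.Str.join " " (ws.drop 2)
      if col = attribute1 then
        some (false, p, PySem.Str.replace (PySem.Str.join " " ((PySem.Str.split? p " of ").getD [])) "sum " "total ")
      else ctA_scan col rest

-- one iteration of the outer `for column_1 in col_list_title` loop; state = (title1, title2, title_nlus)
def ctA_step (st : List String × List String × List String) (col : String) :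
    List String × List String × List String :=
  match ctA_scan col st.2.2 with
  | none => st
  | some (true, p, a) => (st.1, st.2.1 ++ [a], (PySem.List.remove? st.2.2 p).getD st.2.2)
  | some (false, p, a) => (st.1 ++ [a], st.2.1, (PySem.List.remove? st.2.2 p).getD st.2.2)

def create_title (aggregations : List String) (group_by : List String) (col_list_title : List String) (keys : List String) (growth_nlu : List String) : String :=
  let title_nlus := aggregations ++ group_by
  let st := col_list_title.foldl ctA_step ([], [], title_nlus)
  let title1 := PySem.Str.join " and " st.1
  let title :=
    if st.2.1.length > 0 then
      PySem.Str.replace (title1 ++ " by " ++ PySem.Str.join " and " st.2.1) "_" " "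
    else PySem.Str.replace title1 "_" " "
  let title :=
    if keys.length > 0 then
      if (PySem.Str.split₀ title).contains "by" then
        if keys.length = 1 then title ++ " " ++ "and " ++ keys.headD ""
        else title ++ " " ++ PySem.Str.join " and " keys
      else
        if keys.length = 1 then title ++ " " ++ " by " ++ keys.headD ""
        else title ++ " by " ++ PySem.Str.join " and " keys
    else title
  if growth_nlu.length > 0 then PySem.Str.join "and " growth_nlu ++ " " ++ title else title

-- ===== PORT B =====
-- attribute key and (is_by, output text) entry of one NLU phrase
def ctB_entry (p : String) : String × (Bool × String) :=
  let ws := PySem.Str.split₀ p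
  if ws.head?.getD "" = "by" then
    (PySem.Str.join " " (ws.drop 1), (true, PySem.Str.join " " (ws.drop 1)))
  else
    (PySem.Str.join " " (ws.drop 2),
     (false, PySem.Str.replace (PySem.Str.join " " ((PySem.Str.split? p " of ").getD [])) "sum " "total "))

-- index.setdefault(attr, []).append(entry)
def ctB_index (phrases : List String) : PySem.Dict String (List (Bool × String)) :=
  phrases.foldl (fun d p => d.modify (ctB_entry p).1 [] (· ++ [(ctB_entry p).2])) PySem.Dict.empty

-- one iteration of B's column loop; state = (title1, title2, index)
def ctB_step (st : List String × List String × PySem.Dict String (List (Bool × String)))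
    (col : String) : List String × List String × PySem.Dict String (List (Bool × String)) :=
  match st.2.2.get? col with
  | some ((isBy, text) :: rest) =>
    if isBy then (st.1, st.2.1 ++ [text], st.2.2.insert col rest)
    else (st.1 ++ [text], st.2.1, st.2.2.insert col rest)
  | _ => st

def ctB_append_keys (title : String) (keys : List String) : String :=
  if (PySem.Str.split₀ title).contains "by" then
    if keys.length = 1 then title ++ " and " ++ keys.headD ""
    else title ++ " " ++ PySem.Str.join " and " keys
  else
    if keys.length = 1 then title ++ "  by " ++ keys.headD ""
    else title ++ " by " ++ PySem.Str.join " and " keys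

def create_title_alt (aggregations : List String) (group_by : List String) (col_list_title : List String) (keys : List String) (growth_nlu : List String) : String :=
  let index := ctB_index (aggregations ++ group_by)
  let st := col_list_title.foldl ctB_step ([], [], index)
  let title := PySem.Str.join " and " st.1
  let title := if st.2.1 ≠ [] then title ++ " by " ++ PySem.Str.join " and " st.2.1 else title
  let title := PySem.Str.replace title "_" " "
  let title := if keys.length > 0 then ctB_append_keys title keys else title
  if growth_nlu.length > 0 then PySem.Str.join "and " growth_nlu ++ " " ++ title else title

-- ===== PRECONDITION & SPEC =====
-- A raises IndexError (col_words[0]) when the column scan reaches a phrase with no words;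
-- Pre_ excludes every input carrying a whitespace-only phrase in aggregations/group_by — slightly
-- conservative: A still returns when no column scan happens to reach such a phrase (see cites).
def Pre_create_title (aggregations : List String) (group_by : List String) (col_list_title : List String) (keys : List String) (growth_nlu : List String) : Prop :=
  ∀ s ∈ aggregations ++ group_by, PySem.Str.split₀ s ≠ []
instance (aggregations : List String) (group_by : List String) (col_list_title : List String) (keys : List String) (growth_nlu : List String) : Decidable (Pre_create_title aggregations group_by col_list_title keys growth_nlu) := by unfold Pre_create_title; infer_instance
def pvWitness_create_title : List String × List String × List String × List String × List String :=
  (["sum of sales", "average of profit"], ["by category"], ["sales", "category"], ["month"], ["YTD"])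

def Spec_create_title (aggregations : List String) (group_by : List String) (col_list_title : List String) (keys : List String) (growth_nlu : List String) (out : String) : Prop := out = create_title_alt aggregations group_by col_list_title keys growth_nlu
instance (aggregations : List String) (group_by : List String) (col_list_title : List String) (keys : List String) (growth_nlu : List String) (out : String) : Decidable (Spec_create_title aggregations group_by col_list_title keys growth_nlu out) := by unfold Spec_create_title; infer_instance

-- ===== CLAIM (what is proved, stated in full; the proofs are below) =====
def Claim_equal_create_title : Prop := ∀ (aggregations : List String) (group_by : List String) (col_list_title : List String) (keys : List String) (growth_nlu : List String), Dom_create_title aggregations group_by col_list_title keys growth_nlu → Pre_create_title aggregations group_by col_list_title keys growth_nlu → Spec_create_title aggregations group_by col_list_title keys growth_nlu (create_title aggregations group_by col_list_title keys growth_nlu)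

-- ===== LEMMAS AND PROOFS =====

-- A's scan matches the first phrase whose attribute (ctB_entry …).1 equals the column,
-- and yields exactly that phrase's entry.
theorem ctA_scan_eq (col : String) (l : List String) :
    ctA_scan col l =
      (l.find? (fun p => col == (ctB_entry p).1)).map
        (fun p => ((ctB_entry p).2.1, p, (ctB_entry p).2.2)) := by
  induction l with
  | nil => rfl
  | cons p rest ih =>
    have hcons : ctA_scan col (p :: rest) =
        if col = (ctB_entry p).1 then some ((ctB_entry p).2.1, p, (ctB_entry p).2.2)
        else ctA_scan col rest := by
      simp only [ctA_scan, ctB_entry]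
      by_cases hby : (PySem.Str.split₀ p).head?.getD "" = "by" <;> simp [hby]
    rw [hcons]
    by_cases hcol : col = (ctB_entry p).1
    · rw [List.find?_cons_of_pos (by simp [hcol])]; simp [hcol]
    · rw [List.find?_cons_of_neg (by simp [hcol])]; simp [hcol, ih]

-- the dict state corresponds to the remaining nlus list
def ctRel (d : PySem.Dict String (List (Bool × String))) (l : List String) : Prop :=
  (∀ a : String, d.getD a [] = (l.filter (fun p => (ctB_entry p).1 == a)).map (fun p => (ctB_entry p).2))

theorem ctRel_index (l : List String) : ctRel (ctB_index l) l := by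
  intro a
  have := PySem.Dict.getD_foldl_modify_append (l := l.map ctB_entry) (d := PySem.Dict.empty) (c := a)
  simpa [ctB_index, List.foldl_map, List.filter_map, Function.comp, PySem.Dict.getD_empty] using this

theorem ct_step_agree (t1 t2 : List String) (d : PySem.Dict String (List (Bool × String)))
    (l : List String) (col : String) (h : ctRel d l) :
    (ctA_step (t1, t2, l) col).1 = (ctB_step (t1, t2, d) col).1 ∧
    (ctA_step (t1, t2, l) col).2.1 = (ctB_step (t1, t2, d) col).2.1 ∧
    ctRel (ctB_step (t1, t2, d) col).2.2 (ctA_step (t1, t2, l) col).2.2 := by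
  unfold ctA_step ctB_step
  rw [ctA_scan_eq]
  cases hf : l.find? (fun p => col == (ctB_entry p).1) with
  | none =>
    have hfil : l.filter (fun q => (ctB_entry q).1 == col) = [] := by
      rw [List.filter_eq_nil_iff]
      intro q hq
      have := List.find?_eq_none.mp hf q hq
      simp only [beq_iff_eq] at this ⊢
      exact fun e => this e.symm
    have hd : d.getD col [] = [] := by rw [h col, hfil]; rfl
    cases hg : d.get? col with
    | none => simp only [Option.map_none]; exact ⟨trivial, trivial, h⟩
    | some v =>
      have hv : v = [] := by
        rw [PySem.Dict.getD_eq_get?_getD, hg] at hd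
        exact hd
      subst hv
      simp only [Option.map_none]; exact ⟨trivial, trivial, h⟩
  | some p =>
    obtain ⟨hp, l1, l2, hl, hpre⟩ := List.find?_eq_some_iff_append.mp hf
    have hattr : (ctB_entry p).1 = col := (beq_iff_eq.mp hp).symm
    have hfil1 : l1.filter (fun q => (ctB_entry q).1 == col) = [] := by
      rw [List.filter_eq_nil_iff]
      intro q hq
      have := hpre q hq
      simp only [Bool.not_eq_eq_eq_not, Bool.not_true, beq_eq_false_iff_ne, ne_eq] at this ⊢
      simp only [beq_iff_eq]
      exact fun e => this e.symm
    have hfil : l.filter (fun q => (ctB_entry q).1 == col) =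
        p :: l2.filter (fun q => (ctB_entry q).1 == col) := by
      subst hl
      rw [List.filter_append, hfil1]
      simp [hattr]
    have hget : d.get? col =
        some ((ctB_entry p).2 :: (l2.filter (fun q => (ctB_entry q).1 == col)).map (fun q => (ctB_entry q).2)) := by
      have hD := h col
      rw [hfil] at hD
      cases hg : d.get? col with
      | none =>
        rw [PySem.Dict.getD_eq_get?_getD, hg] at hD
        simp only [Option.getD_none] at hD
        exact (List.cons_ne_nil _ _ hD.symm).elim
      | some v =>
        rw [PySem.Dict.getD_eq_get?_getD, hg] at hD
        simp only [Option.getD_some, List.map_cons] at hD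
        rw [hD]
    have hpnot : p ∉ l1 := by
      intro hm
      have := hpre p hm
      rw [hp] at this
      simp at this
    have hmem : p ∈ l := by rw [hl]; exact List.mem_append_right _ (List.mem_cons_self)
    have hrem : (PySem.List.remove? l p).getD l = l1 ++ l2 := by
      rw [PySem.List.remove?_eq_some_erase l p hmem, Option.getD_some, hl,
        List.erase_append_right _ hpnot, List.erase_cons_head]
    have hrel : ctRel (d.insert col ((l2.filter (fun q => (ctB_entry q).1 == col)).map (fun q => (ctB_entry q).2))) (l1 ++ l2) := by
      intro a
      by_cases ha : a = col
      · subst ha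
        rw [PySem.Dict.getD_insert_self, List.filter_append, hfil1, List.nil_append]
      · rw [PySem.Dict.getD_insert_of_ne d _ _ ha, h a, hl]
        rw [List.filter_append, List.filter_append, List.filter_cons]
        have : ((ctB_entry p).1 == a) = false := by
          simp only [beq_eq_false_iff_ne, ne_eq, hattr]
          exact fun e => ha e.symm
        rw [this]
        simp
    cases hE : (ctB_entry p).2 with
    | mk isBy text =>
      rw [hE] at hget
      cases isBy
      · simp only [hget, hE, Option.map_some, hrem, Bool.false_eq_true, if_false]
        exact ⟨by trivial, by trivial, hrel⟩
      · simp only [hget, hE, Option.map_some, hrem, if_true]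
        exact ⟨by trivial, by trivial, hrel⟩

theorem ct_loop_agree (cols : List String) :
    ∀ (t1 t2 : List String) d l, ctRel d l →
    (cols.foldl ctA_step (t1, t2, l)).1 = (cols.foldl ctB_step (t1, t2, d)).1 ∧
    (cols.foldl ctA_step (t1, t2, l)).2.1 = (cols.foldl ctB_step (t1, t2, d)).2.1 := by
  induction cols with
  | nil => intro t1 t2 d l h; exact ⟨rfl, rfl⟩
  | cons c cs ih =>
    intro t1 t2 d l h
    obtain ⟨h1, h2, h3⟩ := ct_step_agree t1 t2 d l c h
    simp only [List.foldl_cons]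
    have ea : ctA_step (t1, t2, l) c =
        ((ctA_step (t1, t2, l) c).1, (ctA_step (t1, t2, l) c).2.1, (ctA_step (t1, t2, l) c).2.2) := rfl
    have eb : ctB_step (t1, t2, d) c =
        ((ctB_step (t1, t2, d) c).1, (ctB_step (t1, t2, d) c).2.1, (ctB_step (t1, t2, d) c).2.2) := rfl
    rw [ea, eb, h1, h2]
    exact ih _ _ _ _ h3

-- ===== VERDICT (by name: the statement is the Claim_ definition above) =====
theorem create_title_spec : Claim_equal_create_title := by
  intro ag gb cl ks gr _ _
  unfold Spec_create_title create_title create_title_alt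
  dsimp only
  obtain ⟨h1, h2⟩ := ct_loop_agree cl [] [] (ctB_index (ag ++ gb)) (ag ++ gb) (ctRel_index _)
  rw [h1, h2]
  generalize (List.foldl ctB_step ([], [], ctB_index (ag ++ gb)) cl).1 = T1
  generalize (List.foldl ctB_step ([], [], ctB_index (ag ++ gb)) cl).2.1 = T2
  have hmid : (if T2.length > 0 then
        PySem.Str.replace (PySem.Str.join " and " T1 ++ " by " ++ PySem.Str.join " and " T2) "_" " "
      else PySem.Str.replace (PySem.Str.join " and " T1) "_" " ")
      = PySem.Str.replace (if T2 ≠ [] then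
          PySem.Str.join " and " T1 ++ " by " ++ PySem.Str.join " and " T2
        else PySem.Str.join " and " T1) "_" " " := by
    cases T2 <;> simp
  rw [hmid]
  have cat : ∀ (a b c : String), a ++ b = c → ∀ t k : String, t ++ a ++ b ++ k = t ++ c ++ k := by
    intro a b c h t k
    rw [String.append_assoc (s₁ := t) (s₂ := a) (s₃ := b), h]
  have hkeys : ∀ T : String,
      (if (PySem.Str.split₀ T).contains "by" then
        if ks.length = 1 then T ++ " " ++ "and " ++ ks.headD "" else T ++ " " ++ PySem.Str.join " and " ks
      else if ks.length = 1 then T ++ " " ++ " by " ++ ks.headD "" else T ++ " by " ++ PySem.Str.join " and " ks)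
      = ctB_append_keys T ks := by
    intro T
    unfold ctB_append_keys
    rw [cat " " "and " " and " rfl T (ks.headD ""), cat " " " by " "  by " rfl T (ks.headD "")]
  simp only [hkeys]
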